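-- pv_equiv track=rewrite | github.com/nevikw39/oj | LeetCode/5906.py | f
-- ===== SOURCE A (Python) =====
-- def f(x: str) -> bool:
--     l = len(x)
--     if x.count('-') > 1:
--         return False
--     i = x.find('-')
--     if i != -1 and (i == 0 or i == l - 1 or not x[i - 1].isalpha() or not x[i + 1].isalpha()):
--         return False
--     for i in range(l - 1):
--         if x[i] in "!.,":
--             return False
--     return True
-- ===== SOURCE B (Python) =====
-- def f(x: str) -> bool:
--     l = len(x)
--     cnt = 0
--     for i in range(l):
--         c = x[i]
--         if c == '-':
--             cnt += 1
--             if cnt > 1: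
--                 return False
--             if i == 0 or i == l - 1 or not x[i - 1].isalpha() or not x[i + 1].isalpha():
--                 return False
--         elif c in "!.," and i != l - 1:
--             return False
--     return True
-- ===== Notes on version B (the rewrite author's own statement) =====
-- stated objective: alternative
-- what changed: Replaced A's three separate scans (hyphen count, hyphen find plus neighbour test, and a punctuation loop) by a single left-to-right pass that maintains a running hyphen count and checks each character's condition in place.
import Mathlib
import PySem

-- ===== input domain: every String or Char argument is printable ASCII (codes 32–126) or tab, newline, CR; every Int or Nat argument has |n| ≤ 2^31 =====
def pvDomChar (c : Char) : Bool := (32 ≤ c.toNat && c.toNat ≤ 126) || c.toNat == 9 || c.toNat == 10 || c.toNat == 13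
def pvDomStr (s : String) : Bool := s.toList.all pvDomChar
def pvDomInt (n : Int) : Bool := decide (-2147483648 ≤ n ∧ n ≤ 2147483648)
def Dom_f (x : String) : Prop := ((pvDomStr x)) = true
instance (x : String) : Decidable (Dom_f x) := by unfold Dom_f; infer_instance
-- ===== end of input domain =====

-- B fuses A's three scans (hyphen count, find + neighbour test, punctuation loop) into one
-- pass over the indices with a running hyphen count; same verdict on every input (objective: alternative).

-- ===== PORT A =====
-- 'for i in range(l - 1): if x[i] in "!.,": return False' — index i is always in range, so getD is exact
def fPunctLoop (cs : List Char) (j : Nat) : Bool :=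
  if j < cs.length - 1 then
    if PySem.Chars.isIn [cs.getD j ' '] ['!', '.', ','] then false
    else fPunctLoop cs (j + 1)
  else true
termination_by cs.length - 1 - j

-- x[i-1] / x[i+1] are only evaluated when the guard has ensured 0 < i < l-1, so pyGetD is exact
def f (x : String) : Bool :=
  let cs := x.toList
  let l : Int := PySem.Str.len x
  if PySem.Chars.count cs ['-'] > 1 then false
  else
    let i : Int := PySem.Chars.find cs ['-']
    if i ≠ -1 ∧ (i = 0 ∨ i = l - 1 ∨
        ¬ PySem.Chars.isalpha (PySem.List.pyGetD cs (i - 1) ' ') = true ∨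
        ¬ PySem.Chars.isalpha (PySem.List.pyGetD cs (i + 1) ' ') = true) then false
    else fPunctLoop cs 0

-- ===== PORT B =====
-- single pass with a running hyphen count (from Source B); all indices used are in range
def fAltLoop (cs : List Char) (i : Nat) (cnt : Nat) : Bool :=
  if i < cs.length then
    let c := cs.getD i ' '
    if c = '-' then
      if cnt + 1 > 1 then false
      else if i = 0 ∨ i = cs.length - 1 ∨
          ¬ PySem.Chars.isalpha (cs.getD (i - 1) ' ') = true ∨
          ¬ PySem.Chars.isalpha (cs.getD (i + 1) ' ') = true then false
      else fAltLoop cs (i + 1) (cnt + 1)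
    else if PySem.Chars.isIn [c] ['!', '.', ','] ∧ i ≠ cs.length - 1 then false
    else fAltLoop cs (i + 1) cnt
  else true
termination_by cs.length - i

def f_alt (x : String) : Bool := fAltLoop x.toList 0 0

-- ===== PRECONDITION & SPEC =====
def Spec_f (x : String) (out : Bool) : Prop := out = f_alt x
instance (x : String) (out : Bool) : Decidable (Spec_f x out) := by unfold Spec_f; infer_instance

-- ===== CLAIM (what is proved, stated in full; the proofs are below) =====
def Claim_equal_f : Prop := ∀ (x : String), Dom_f x → Spec_f x (f x)

-- ===== LEMMAS AND PROOFS =====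

-- the condition both programs test at one index (vacuous at out-of-range indices, where getD gives ' ')
def pvOk (cs : List Char) (i : Nat) : Prop :=
  (cs.getD i ' ' = '-' →
    0 < i ∧ i + 1 < cs.length ∧
    PySem.Chars.isalpha (cs.getD (i - 1) ' ') = true ∧
    PySem.Chars.isalpha (cs.getD (i + 1) ' ') = true)
  ∧ (PySem.Chars.isIn [cs.getD i ' '] ['!', '.', ','] = true → i + 1 = cs.length)

def pvGood (cs : List Char) : Prop := cs.count '-' ≤ 1 ∧ ∀ i, pvOk cs i

theorem isIn_space_punct : PySem.Chars.isIn [' '] ['!', '.', ','] = false := by decide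

theorem isIn_hyphen_punct : PySem.Chars.isIn ['-'] ['!', '.', ','] = false := by decide

theorem pvOk_of_ge (cs : List Char) (j : Nat) (h : cs.length ≤ j) : pvOk cs j := by
  unfold pvOk
  rw [List.getD_eq_default _ _ h]
  refine ⟨by intro hc; exact absurd hc (by decide), by intro hp; exact absurd hp (by simp [isIn_space_punct])⟩

theorem count_go_singleton (c : Char) (l : List Char) (fuel acc : Nat) (h : l.length ≤ fuel) :
    PySem.Chars.count.go [c] fuel l acc = acc + l.count c := by
  induction l generalizing fuel acc with
  | nil => cases fuel <;> simp [PySem.Chars.count.go]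
  | cons a t ih =>
    cases fuel with
    | zero => simp at h
    | succ n =>
      simp only [List.length_cons, Nat.succ_le_succ_iff] at h
      by_cases hac : a = c
      · subst hac
        simp [PySem.Chars.count.go, List.isPrefixOf, ih n _ h]
        omega
      · simp [PySem.Chars.count.go, List.isPrefixOf, hac, ih n _ h, Ne.symm hac]

theorem count_singleton (cs : List Char) (c : Char) :
    PySem.Chars.count cs [c] = cs.count c := by
  simp [PySem.Chars.count, count_go_singleton c cs cs.length 0 le_rfl]

theorem singleton_prefix_iff (c : Char) (t : List Char) : ([c] <+: t) ↔ t.head? = some c := by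
  cases t with
  | nil => simp
  | cons a t => simp [List.cons_prefix_cons, eq_comm]

theorem drop_count_eq (cs : List Char) (i : Nat) (h : i < cs.length) :
    (cs.drop i).count '-' =
      (if cs.getD i ' ' = '-' then 1 else 0) + (cs.drop (i + 1)).count '-' := by
  rw [List.drop_eq_getElem_cons h, List.getD_eq_getElem _ _ h, List.count_cons]
  split_ifs <;> simp_all
  omega

theorem fAltLoop_eq (cs : List Char) (i cnt : Nat) :
    cnt + (cs.drop i).count '-' = cs.count '-' → cnt ≤ 1 →
    (fAltLoop cs i cnt = true ↔ cs.count '-' ≤ 1 ∧ ∀ j, i ≤ j → pvOk cs j) := by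
  induction i, cnt using fAltLoop.induct cs with
  | case1 i cnt hi c hc hcnt =>
    intro hsum _
    have hc' : cs.getD i ' ' = '-' := hc
    rw [fAltLoop, if_pos hi, if_pos hc', if_pos hcnt]
    simp only [Bool.false_eq_true, false_iff]
    rintro ⟨hle, -⟩
    have := drop_count_eq cs i hi
    rw [if_pos hc'] at this
    omega
  | case2 i cnt hi c hc hcnt hg =>
    intro _ _
    have hc' : cs.getD i ' ' = '-' := hc
    rw [fAltLoop, if_pos hi, if_pos hc', if_neg hcnt, if_pos hg]
    simp only [Bool.false_eq_true, false_iff]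
    rintro ⟨-, H⟩
    obtain ⟨h1, -⟩ := H i le_rfl
    obtain ⟨p1, p2, p3, p4⟩ := h1 hc'
    rcases hg with h | h | h | h
    · omega
    · omega
    · exact h p3
    · exact h p4
  | case3 i cnt hi c hc hcnt hg ih =>
    intro hsum h1
    have hc' : cs.getD i ' ' = '-' := hc
    have hdc := drop_count_eq cs i hi
    rw [if_pos hc'] at hdc
    rw [fAltLoop, if_pos hi, if_pos hc', if_neg hcnt, if_neg hg]
    rw [ih (by omega) (by omega)]
    push Not at hg
    constructor
    · rintro ⟨hle, H⟩
      refine ⟨hle, fun j hj => ?_⟩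
      rcases Nat.eq_or_lt_of_le hj with rfl | h
      · exact ⟨fun _ => ⟨by omega, by omega, hg.2.2.1, hg.2.2.2⟩,
          fun hp => by rw [hc'] at hp; exact absurd hp (by simp [isIn_hyphen_punct])⟩
      · exact H j h
    · rintro ⟨hle, H⟩
      exact ⟨hle, fun j hj => H j (by omega)⟩
  | case4 i cnt hi c hc hp =>
    intro _ _
    have hc' : ¬ cs.getD i ' ' = '-' := hc
    have hp' : PySem.Chars.isIn [cs.getD i ' '] ['!', '.', ','] = true ∧ i ≠ cs.length - 1 := hp
    rw [fAltLoop, if_pos hi, if_neg hc', if_pos hp']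
    simp only [Bool.false_eq_true, false_iff]
    rintro ⟨-, H⟩
    obtain ⟨-, h2⟩ := H i le_rfl
    have := h2 hp'.1
    have := hp'.2
    omega
  | case5 i cnt hi c hc hp ih =>
    intro hsum h1
    have hc' : ¬ cs.getD i ' ' = '-' := hc
    have hp' : ¬ (PySem.Chars.isIn [cs.getD i ' '] ['!', '.', ','] = true ∧ i ≠ cs.length - 1) := hp
    have hdc := drop_count_eq cs i hi
    rw [if_neg hc'] at hdc
    rw [fAltLoop, if_pos hi, if_neg hc', if_neg hp']
    rw [ih (by omega) h1]
    push Not at hp'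
    constructor
    · rintro ⟨hle, H⟩
      refine ⟨hle, fun j hj => ?_⟩
      rcases Nat.eq_or_lt_of_le hj with rfl | h
      · refine ⟨fun hcj => absurd hcj hc', fun hpj => ?_⟩
        have := hp' hpj
        omega
      · exact H j h
    · rintro ⟨hle, H⟩
      exact ⟨hle, fun j hj => H j (by omega)⟩
  | case6 i cnt hi =>
    intro hsum h1
    rw [fAltLoop, if_neg hi]
    simp only [true_iff]
    rw [List.drop_eq_nil_of_le (by omega)] at hsum
    simp at hsum
    exact ⟨by omega, fun j hj => pvOk_of_ge cs j (by omega)⟩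

theorem fPunctLoop_eq (cs : List Char) (j : Nat) :
    (fPunctLoop cs j = true ↔
      ∀ k, j ≤ k → (PySem.Chars.isIn [cs.getD k ' '] ['!', '.', ','] = true → k + 1 = cs.length)) := by
  induction j using fPunctLoop.induct cs with
  | case1 j hj hp =>
    rw [fPunctLoop, if_pos hj, if_pos hp]
    simp only [Bool.false_eq_true, false_iff]
    intro H
    have := H j le_rfl hp
    omega
  | case2 j hj hp ih =>
    rw [fPunctLoop, if_pos hj, if_neg hp, ih]
    constructor
    · intro H k hk hpk
      rcases Nat.eq_or_lt_of_le hk with rfl | h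
      · exact absurd hpk hp
      · exact H k h hpk
    · intro H k hk hpk; exact H k (by omega) hpk
  | case3 j hj =>
    rw [fPunctLoop, if_neg hj]
    simp only [true_iff]
    intro k hk hpk
    by_cases hkl : k < cs.length
    · omega
    · rw [List.getD_eq_default _ _ (by omega)] at hpk
      exact absurd hpk (by simp [isIn_space_punct])

theorem getD_ne_hyphen_of_not_mem (cs : List Char) (j : Nat) (h : '-' ∉ cs) :
    cs.getD j ' ' ≠ '-' := by
  by_cases hj : j < cs.length
  · rw [List.getD_eq_getElem _ _ hj]
    intro he
    exact h (he ▸ List.getElem_mem hj)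
  · rw [List.getD_eq_default _ _ (by omega)]
    decide

theorem f_eq_good (x : String) : (f x = true ↔ pvGood x.toList) := by
  show ((if PySem.Chars.count x.toList ['-'] > 1 then false
    else if (PySem.Chars.find x.toList ['-']) ≠ -1 ∧ ((PySem.Chars.find x.toList ['-']) = 0 ∨ (PySem.Chars.find x.toList ['-']) = PySem.Str.len x - 1 ∨
        ¬ PySem.Chars.isalpha (PySem.List.pyGetD x.toList ((PySem.Chars.find x.toList ['-']) - 1) ' ') = true ∨
        ¬ PySem.Chars.isalpha (PySem.List.pyGetD x.toList ((PySem.Chars.find x.toList ['-']) + 1) ' ') = true) then false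
    else fPunctLoop x.toList 0) = true ↔ pvGood x.toList)
  rw [count_singleton, PySem.Str.len_eq]
  set cs := x.toList with hcs
  by_cases hcnt : cs.count '-' > 1
  · rw [if_pos hcnt]
    simp only [Bool.false_eq_true, false_iff]
    rintro ⟨h, -⟩; omega
  · rw [if_neg hcnt]
    by_cases hfind : PySem.Chars.find cs ['-'] = -1
    · -- no hyphen at all
      have hmem : '-' ∉ cs := by
        intro hm
        rw [PySem.Chars.find_eq_neg_one_iff] at hfind
        exact hfind (by
          obtain ⟨s, t, h⟩ := List.mem_iff_append.mp hm
          exact ⟨s, t, by rw [h]; simp⟩)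
      rw [if_neg (by simp [hfind])]
      rw [fPunctLoop_eq]
      unfold pvGood pvOk
      constructor
      · intro H
        refine ⟨by omega, fun j => ⟨fun hc => absurd hc (getD_ne_hyphen_of_not_mem cs j hmem), fun hp => H j (by omega) hp⟩⟩
      · rintro ⟨-, H⟩ k _ hpk
        exact (H k).2 hpk
    · -- exactly one hyphen, at index n = (find).toNat
      have hge : 0 ≤ PySem.Chars.find cs ['-'] := by
        have := PySem.Chars.neg_one_le_find cs ['-']
        omega
      obtain ⟨hpre, hfirst⟩ := PySem.Chars.find_spec hge
      set n := (PySem.Chars.find cs ['-']).toNat with hn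
      rw [singleton_prefix_iff, List.head?_drop] at hpre
      have hnlen : n < cs.length := by
        rcases Nat.lt_or_ge n cs.length with h | h
        · exact h
        · rw [List.getElem?_eq_none (by omega)] at hpre; simp at hpre
      have hgetn : cs.getD n ' ' = '-' := by
        rw [List.getD_eq_getElem _ _ hnlen]
        have := List.getElem?_eq_getElem hnlen
        rw [this] at hpre
        exact Option.some_injective _ hpre
      -- no hyphen anywhere else
      have honly : ∀ m, cs.getD m ' ' = '-' → m = n := by
        intro m hm
        by_cases hmlen : m < cs.length
        · rw [List.getD_eq_getElem _ _ hmlen] at hm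
          by_contra hne
          rcases Nat.lt_or_ge m n with hlt | hgt
          · refine hfirst m hlt ?_
            rw [singleton_prefix_iff, List.head?_drop, List.getElem?_eq_getElem hmlen, hm]
          · have hgt' : n < m := by omega
            have h2 : 2 ≤ cs.count '-' := by
              have hsplit : cs = cs.take (n + 1) ++ cs.drop (n + 1) := (List.take_append_drop _ _).symm
              have h1 : 1 ≤ (cs.take (n + 1)).count '-' := by
                have : '-' ∈ cs.take (n + 1) := by
                  rw [← hgetn, List.getD_eq_getElem _ _ hnlen]
                  exact List.mem_take_iff_getElem.mpr ⟨n, by omega, by simp⟩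
                exact List.one_le_count_iff.mpr this
              have h2' : 1 ≤ (cs.drop (n + 1)).count '-' := by
                have : '-' ∈ cs.drop (n + 1) := by
                  rw [List.mem_iff_getElem]
                  have hml : m - (n + 1) < (cs.drop (n + 1)).length := by simp; omega
                  refine ⟨m - (n + 1), hml, ?_⟩
                  rw [List.getElem_drop]
                  have hidx : n + 1 + (m - (n + 1)) = m := by omega
                  simp only [hidx]
                  exact hm
                exact List.one_le_count_iff.mpr this
              calc 2 ≤ (cs.take (n + 1)).count '-' + (cs.drop (n + 1)).count '-' := by omega
                _ = cs.count '-' := by rw [← List.count_append, List.take_append_drop]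
            omega
        · rw [List.getD_eq_default _ _ (by omega)] at hm
          exact absurd hm (by decide)
      have hcast : PySem.Chars.find cs ['-'] = (n : Int) := by omega
      -- the neighbour guard of A at n versus pvOk's first conjunct
      by_cases hok : 0 < n ∧ n + 1 < cs.length ∧
          PySem.Chars.isalpha (cs.getD (n - 1) ' ') = true ∧
          PySem.Chars.isalpha (cs.getD (n + 1) ' ') = true
      · -- guard is false: A runs the punctuation loop
        rw [if_neg (by
          rw [hcast]
          rintro ⟨-, h | h | h | h⟩
          · omega
          · rw [show ((n : Int)) = ((cs.length : Int)) - 1 ↔ (n + 1 = cs.length) by omega] at h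
            omega
          · rw [show ((n : Int)) - 1 = ((n - 1 : Nat) : Int) by omega, PySem.List.pyGetD_natCast] at h
            exact h hok.2.2.1
          · rw [show ((n : Int)) + 1 = ((n + 1 : Nat) : Int) by omega, PySem.List.pyGetD_natCast] at h
            exact h hok.2.2.2)]
        rw [fPunctLoop_eq]
        unfold pvGood pvOk
        constructor
        · intro H
          refine ⟨by omega, fun j => ⟨fun hc => ?_, fun hp => H j (by omega) hp⟩⟩
          rw [honly j hc]
          exact hok
        · rintro ⟨-, H⟩ k _ hpk
          exact (H k).2 hpk
      · -- guard is true: A returns False, pvOk n fails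
        rw [if_pos (by
          rw [hcast]
          refine ⟨by omega, ?_⟩
          by_cases h0 : n = 0
          · exact Or.inl (by omega)
          · by_cases hl : n + 1 = cs.length
            · exact Or.inr (Or.inl (by omega))
            · rcases not_and_or.mp hok with h | h
              · omega
              rcases not_and_or.mp h with h | h
              · omega
              rcases not_and_or.mp h with h | h
              · refine Or.inr (Or.inr (Or.inl ?_))
                rw [show ((n : Int)) - 1 = ((n - 1 : Nat) : Int) by omega, PySem.List.pyGetD_natCast]
                exact h
              · refine Or.inr (Or.inr (Or.inr ?_))
                rw [show ((n : Int)) + 1 = ((n + 1 : Nat) : Int) by omega, PySem.List.pyGetD_natCast]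
                exact h)]
        simp only [Bool.false_eq_true, false_iff]
        unfold pvGood pvOk
        rintro ⟨-, H⟩
        exact hok ((H n).1 hgetn)

-- ===== VERDICT (by name: the statement is the Claim_ definition above) =====
theorem f_spec : Claim_equal_f := by
  intro x _
  show f x = f_alt x
  rw [Bool.eq_iff_iff, f_eq_good, f_alt, fAltLoop_eq x.toList 0 0 (by simp) (by norm_num)]
  simp [pvGood]
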